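-- pv_equiv track=rewrite | github.com/srivatsavdevarakonda/flames-game | backend/flames_engine.py | apply_flames_elimination
-- ===== SOURCE A (Python) =====
-- def apply_flames_elimination(count: int):
--     """
--     Perform circular FLAMES elimination.
--     Starting from the last eliminated position, count forward `count` steps
--     and eliminate that letter. Repeat until one letter remains.
--
--     Args:
--         count (int): The number of remaining letters (used as step size)
--
--     Returns:
--         winner          (str): The surviving FLAMES letter
--         elimination_order (list): Letters in the order they were eliminated
--     """
--     flames = list("FLAMES")
--     if count == 0:
--         count = 1  # Treat 0 as 1 to avoid division errors
--
--     idx = 0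
--     elimination_order = []
--
--     while len(flames) > 1:
--         idx = (idx + count - 1) % len(flames)
--         eliminated = flames.pop(idx)
--         elimination_order.append(eliminated)
--         if idx >= len(flames):
--             idx = 0
--
--     return flames[0], elimination_order
-- ===== SOURCE B (Python) =====
-- def apply_flames_elimination(count: int):
--     """Tombstone-array FLAMES elimination: fixed letters with an alive mask,
--     a survivor count and a rank pointer, instead of popping from a list."""
--     letters = list("FLAMES")
--     alive = [True] * 6
--     step = count if count != 0 else 1
--     remaining = 6
--     pos = 0  # rank among the alive slots
--     order = []
--     while remaining > 1:
--         pos = (pos + step - 1) % remaining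
--         # locate the pos-th alive slot
--         seen = -1
--         i = 0
--         for j in range(6):
--             if alive[j]:
--                 seen += 1
--                 if seen == pos:
--                     i = j
--                     break
--         alive[i] = False
--         order.append(letters[i])
--         remaining -= 1
--         if pos >= remaining:
--             pos = 0
--     winner = letters[alive.index(True)]
--     return winner, order
-- ===== Notes on version B (the rewrite author's own statement) =====
-- stated objective: alternative
-- what changed: Replaced A's pop-and-compact list elimination with a fixed letter array plus a boolean alive mask, a survivor count and a rank pointer (tombstones); positions are located by scanning alive slots instead of mutating the list.
import Mathlib
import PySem

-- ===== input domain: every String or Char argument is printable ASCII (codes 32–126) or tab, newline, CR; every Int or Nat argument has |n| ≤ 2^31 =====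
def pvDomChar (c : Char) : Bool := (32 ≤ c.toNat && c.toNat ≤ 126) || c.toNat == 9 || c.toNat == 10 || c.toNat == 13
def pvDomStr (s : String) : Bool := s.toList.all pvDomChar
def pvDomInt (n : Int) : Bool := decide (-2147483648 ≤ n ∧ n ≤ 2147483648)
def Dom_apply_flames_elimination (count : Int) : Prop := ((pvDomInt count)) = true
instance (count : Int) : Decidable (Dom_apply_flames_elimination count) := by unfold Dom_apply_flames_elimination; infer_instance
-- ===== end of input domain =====

-- B replaces A's pop-and-compact list by a fixed letter array with a boolean alive mask,
-- a survivor count and a rank pointer (tombstones); same results, alternative structure.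

-- ===== PORT A =====
-- while-loop of A as fuel recursion (fuel 5 = exact number of iterations; the fuel only makes it total)
def aLoop (count : Int) : Nat → List String → Int → List String → (String × List String)
  | 0, flames, _, order => ((PySem.List.pyGet? flames 0).getD "", order)
  | n+1, flames, idx, order =>
    if flames.length > 1 then
      let idx' := PySem.Int.mod (idx + count - 1) (flames.length : Int)
      match PySem.List.pop? flames idx' with
      | some (el, rest) =>
        let idx'' := if idx' ≥ (rest.length : Int) then 0 else idx'
        aLoop count n rest idx'' (order ++ [el])
      | none => ((PySem.List.pyGet? flames 0).getD "", order)  -- unreachable: idx' is in range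
    else ((PySem.List.pyGet? flames 0).getD "", order)

def apply_flames_elimination (count : Int) : String × List String :=
  let flames : List String := ["F", "L", "A", "M", "E", "S"]
  let count := if count = 0 then 1 else count
  aLoop count 5 flames 0 []

-- ===== PORT B =====
def bLetters : List String := ["F", "L", "A", "M", "E", "S"]

-- the for-j-in-range(6) scan locating the pos-th alive slot (with break), seen starts at -1
def bFind : List Nat → List Bool → Int → Int → Nat
  | [], _, _, _ => 0                       -- Python's initial i = 0 (never reached when pos is in range)
  | j :: js, alive, pos, seen =>
    if alive.getD j false then
      (if seen + 1 = pos then j else bFind js alive pos (seen + 1))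
    else bFind js alive pos seen

-- letters[alive.index(True)]
def bWinner (alive : List Bool) : String :=
  match PySem.List.index? alive true with
  | some k => bLetters.getD k ""
  | none => ""                             -- unreachable: one slot always stays alive

def bLoop (step : Int) : Nat → List Bool → Int → Int → List String → (String × List String)
  | 0, alive, _, _, order => (bWinner alive, order)
  | n+1, alive, remaining, pos, order =>
    if remaining > 1 then
      let pos' := PySem.Int.mod (pos + step - 1) remaining
      let i := bFind (List.range 6) alive pos' (-1)
      let alive' := alive.set i false
      let order' := order ++ [bLetters.getD i ""]
      let rem' := remaining - 1
      let pos'' := if pos' ≥ rem' then 0 else pos'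
      bLoop step n alive' rem' pos'' order'
    else (bWinner alive, order)

def apply_flames_elimination_alt (count : Int) : String × List String :=
  let step := if count ≠ 0 then count else 1
  bLoop step 5 [true, true, true, true, true, true] 6 0 []

-- ===== PRECONDITION & SPEC =====
def Spec_apply_flames_elimination (count : Int) (out : String × List String) : Prop := out = apply_flames_elimination_alt count
instance (count : Int) (out : String × List String) : Decidable (Spec_apply_flames_elimination count out) := by unfold Spec_apply_flames_elimination; infer_instance

-- ===== CLAIM (what is proved, stated in full; the proofs are below) =====
def Claim_equal_apply_flames_elimination : Prop := ∀ (count : Int), Dom_apply_flames_elimination count → Spec_apply_flames_elimination count (apply_flames_elimination count)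

-- ===== LEMMAS AND PROOFS =====

-- counts congruent mod 60 step identically: each live modulus m ∈ {2,…,6} divides 60
theorem pv_mod_congr (x c c' m : Int) (hm : 0 < m) (hdvd : m ∣ 60)
    (h : c % 60 = c' % 60) :
    PySem.Int.mod (x + c - 1) m = PySem.Int.mod (x + c' - 1) m := by
  rw [PySem.Int.mod_eq_emod_of_pos hm, PySem.Int.mod_eq_emod_of_pos hm]
  rw [← Int.emod_emod_of_dvd (x + c - 1) hdvd, ← Int.emod_emod_of_dvd (x + c' - 1) hdvd]
  have h60 : (x + c - 1) % 60 = (x + c' - 1) % 60 := by omega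
  rw [h60]

theorem aLoop_congr (c c' : Int) (h : c % 60 = c' % 60) :
    ∀ (n : Nat) (flames : List String) (idx : Int) (order : List String),
      flames.length ≤ 6 →
      aLoop c n flames idx order = aLoop c' n flames idx order := by
  intro n
  induction n with
  | zero => intro flames idx order _; rfl
  | succ n ih =>
    intro flames idx order hlen
    simp only [aLoop]
    by_cases hgt : flames.length > 1
    · simp only [if_pos hgt]
      have hdvd : (flames.length : Int) ∣ 60 := by
        interval_cases h : flames.length <;> decide
      have hmod := pv_mod_congr idx c c' (flames.length : Int) (by exact_mod_cast Nat.zero_lt_of_lt hgt) hdvd h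
      rw [← hmod]
      cases hp : PySem.List.pop? flames (PySem.Int.mod (idx + c - 1) (flames.length : Int)) with
      | none => rfl
      | some r =>
        obtain ⟨el, rest⟩ := r
        have hr : rest.length ≤ 6 := by
          have := PySem.List.length_of_pop?_eq_some flames hp
          simp at this; omega
        exact ih rest _ (order ++ [el]) hr
    · simp only [if_neg hgt]

theorem bLoop_congr (c c' : Int) (h : c % 60 = c' % 60) :
    ∀ (n : Nat) (alive : List Bool) (remaining pos : Int) (order : List String),
      remaining ≤ 6 →
      bLoop c n alive remaining pos order = bLoop c' n alive remaining pos order := by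
  intro n
  induction n with
  | zero => intro alive remaining pos order _; rfl
  | succ n ih =>
    intro alive remaining pos order hrem
    simp only [bLoop]
    by_cases hgt : remaining > 1
    · simp only [if_pos hgt]
      have hdvd : remaining ∣ 60 := by
        interval_cases remaining <;> decide
      have hmod := pv_mod_congr pos c c' remaining (by omega) hdvd h
      rw [← hmod]
      exact ih _ _ _ _ (by omega)
    · simp only [if_neg hgt]

-- the 60 residue classes, checked by kernel computation
theorem pv_key : ∀ r ∈ List.range 60,
    (aLoop (r : Int) 5 ["F", "L", "A", "M", "E", "S"] 0 [] ==
     bLoop (r : Int) 5 [true, true, true, true, true, true] 6 0 []) = true := by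
  decide

-- ===== VERDICT (by name: the statement is the Claim_ definition above) =====
theorem apply_flames_elimination_spec : Claim_equal_apply_flames_elimination := by
  intro count _
  unfold Spec_apply_flames_elimination apply_flames_elimination apply_flames_elimination_alt
  simp only []
  set c : Int := if count = 0 then 1 else count with hc
  have hstep : (if count ≠ 0 then count else 1) = c := by
    by_cases h0 : count = 0 <;> simp [hc, h0]
  rw [hstep]
  have hcc : c % 60 = (c % 60) % 60 := (Int.emod_emod_of_dvd c dvd_rfl).symm
  have hnn : 0 ≤ c % 60 := Int.emod_nonneg c (by norm_num)
  have hlt : c % 60 < 60 := Int.emod_lt_of_pos c (by norm_num)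
  set r : Nat := (c % 60).toNat with hr
  have hcast : (r : Int) = c % 60 := Int.toNat_of_nonneg hnn
  have hmem : r ∈ List.range 60 := by
    rw [List.mem_range]; omega
  have hA : aLoop c 5 ["F", "L", "A", "M", "E", "S"] 0 [] =
      aLoop (r : Int) 5 ["F", "L", "A", "M", "E", "S"] 0 [] := by
    apply aLoop_congr c (r : Int) (by rw [hcast]; exact hcc) 5 _ 0 [] (by simp)
  have hB : bLoop c 5 [true, true, true, true, true, true] 6 0 [] =
      bLoop (r : Int) 5 [true, true, true, true, true, true] 6 0 [] := by
    apply bLoop_congr c (r : Int) (by rw [hcast]; exact hcc) 5 _ 6 0 [] (by norm_num)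
  rw [hA, hB]
  exact eq_of_beq (pv_key r hmem)
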